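-- pv_equiv track=rewrite | github.com/look4yo/FRAC_KG | app.py | _net_effect_sign
-- ===== SOURCE A (Python) =====
-- def _net_effect_sign(rel_list: list[str]) -> int:
--     """Return +1 (net increases target) or -1 (net decreases target) by multiplying signed relations."""
--     s = 1
--     for r in (rel_list or []):
--         r = (r or "").strip()
--         if r == "Increases":
--             s *= 1
--         elif r == "Decreases":
--             s *= -1
--         else:
--             # Causes or other bridge relations treated as neutral
--             s *= 1
--     return 1 if s >= 0 else -1
-- ===== SOURCE B (Python) =====
-- def _net_effect_sign(rel_list: list[str]) -> int:
--     """Return +1 (net increases target) or -1 (net decreases target): two 'Decreases' cancel."""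
--     decs = [r for r in (rel_list or []) if (r or "").strip() == "Decreases"]
--     while len(decs) >= 2:
--         decs = decs[2:]
--     return -1 if decs else 1
-- ===== Notes on version B (the rewrite author's own statement) =====
-- stated objective: alternative
-- what changed: B first collects the 'Decreases' relations into a list and then cancels them off two at a time (each pair of sign flips annihilates), returning -1 exactly when one uncancelled entry remains; A instead threads a running +-1 product through every relation and compares it with zero.
import Mathlib
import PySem

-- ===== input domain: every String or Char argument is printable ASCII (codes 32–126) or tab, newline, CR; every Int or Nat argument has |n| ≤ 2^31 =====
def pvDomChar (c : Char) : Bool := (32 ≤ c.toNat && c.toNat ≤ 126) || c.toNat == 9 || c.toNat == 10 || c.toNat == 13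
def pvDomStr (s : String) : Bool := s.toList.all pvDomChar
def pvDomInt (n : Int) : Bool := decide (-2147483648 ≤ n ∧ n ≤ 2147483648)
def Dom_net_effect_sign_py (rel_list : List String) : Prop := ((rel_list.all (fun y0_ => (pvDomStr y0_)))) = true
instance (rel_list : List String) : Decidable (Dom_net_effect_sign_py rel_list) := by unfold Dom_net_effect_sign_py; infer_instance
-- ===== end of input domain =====

-- B collects the 'Decreases' relations and cancels them two at a time instead of threading a running sign product (alternative decomposition, same cost).

-- ===== PORT A =====
-- A threads a running sign product s through every relation and returns 1 iff s ≥ 0.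
def net_effect_sign_py (rel_list : List String) : Int :=
  let s : Int := rel_list.foldl (fun s r =>
    let r := PySem.Str.strip r
    if r = "Increases" then s * 1
    else if r = "Decreases" then s * (-1)
    else s * 1) 1
  if s ≥ 0 then 1 else -1

-- ===== PORT B =====
-- the 'while len(decs) >= 2: decs = decs[2:]' cancellation loop of Source B
def pvCancelPairs : List String → List String
  | _ :: _ :: t => pvCancelPairs t
  | l => l

def net_effect_sign_py_alt (rel_list : List String) : Int :=
  let decs := rel_list.filter (fun r => PySem.Str.strip r = "Decreases")
  if pvCancelPairs decs ≠ [] then -1 else 1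

-- ===== PRECONDITION & SPEC =====
def Spec_net_effect_sign_py (rel_list : List String) (out : Int) : Prop := out = net_effect_sign_py_alt rel_list
instance (rel_list : List String) (out : Int) : Decidable (Spec_net_effect_sign_py rel_list out) := by unfold Spec_net_effect_sign_py; infer_instance

-- ===== CLAIM (what is proved, stated in full; the proofs are below) =====
def Claim_equal_net_effect_sign_py : Prop := ∀ (rel_list : List String), Dom_net_effect_sign_py rel_list → Spec_net_effect_sign_py rel_list (net_effect_sign_py rel_list)

-- ===== LEMMAS AND PROOFS =====

-- A's fold multiplies the accumulator by -1 exactly once per 'Decreases' entry.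
theorem pv_fold_pow (l : List String) (s : Int) :
    l.foldl (fun s r =>
      let r := PySem.Str.strip r
      if r = "Increases" then s * 1
      else if r = "Decreases" then s * (-1)
      else s * 1) s
    = s * (-1 : Int) ^ (l.countP (fun r => PySem.Str.strip r = "Decreases")) := by
  induction l generalizing s with
  | nil => simp
  | cons h t ih =>
    by_cases hDec : PySem.Str.strip h = "Decreases"
    · have hstep : (let r := PySem.Str.strip h
          if r = "Increases" then s * 1
          else if r = "Decreases" then s * (-1)
          else s * 1) = s * (-1) := by simp [hDec]
      rw [List.foldl_cons, hstep, ih, List.countP_cons]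
      simp [hDec, pow_succ]
    · have hstep : (let r := PySem.Str.strip h
          if r = "Increases" then s * 1
          else if r = "Decreases" then s * (-1)
          else s * 1) = s := by
        by_cases hInc : PySem.Str.strip h = "Increases" <;> simp [hDec, hInc]
      rw [List.foldl_cons, hstep, ih, List.countP_cons]
      simp [hDec]

-- B's pair-cancellation empties a list exactly when its length is even.
theorem pv_cancel_empty_iff (l : List String) : pvCancelPairs l = [] ↔ Even l.length := by
  induction l using pvCancelPairs.induct with
  | case1 a b t ih =>
    rw [pvCancelPairs]
    simpa [Nat.even_add_one, Nat.not_even_iff_odd, Nat.odd_add_one] using ih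
  | case2 l h =>
    cases l with
    | nil => simp [pvCancelPairs]
    | cons a t =>
      cases t with
      | nil => simp [pvCancelPairs]
      | cons b t2 => exact absurd rfl (h a b t2)

-- ===== VERDICT (by name: the statement is the Claim_ definition above) =====
theorem net_effect_sign_py_spec : Claim_equal_net_effect_sign_py := by
  intro rel_list _
  show net_effect_sign_py rel_list = net_effect_sign_py_alt rel_list
  unfold net_effect_sign_py net_effect_sign_py_alt
  simp only [pv_fold_pow, one_mul]
  have hlen : (rel_list.filter (fun r => PySem.Str.strip r = "Decreases")).length
      = rel_list.countP (fun r => PySem.Str.strip r = "Decreases") := List.countP_eq_length_filter.symm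
  rcases Nat.even_or_odd (rel_list.countP (fun r => PySem.Str.strip r = "Decreases")) with he | ho
  · have hempty : pvCancelPairs (rel_list.filter (fun r => PySem.Str.strip r = "Decreases")) = [] :=
      (pv_cancel_empty_iff _).mpr (hlen ▸ he)
    rw [he.neg_one_pow]
    simp [hempty]
  · have hne : pvCancelPairs (rel_list.filter (fun r => PySem.Str.strip r = "Decreases")) ≠ [] := by
      intro h
      exact (Nat.not_even_iff_odd.mpr (hlen ▸ ho)) ((pv_cancel_empty_iff _).mp h)
    rw [ho.neg_one_pow]
    simp [hne]
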